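-- pv_equiv track=rewrite | github.com/satoshin-des/soliton | soliton.py | move_part
-- ===== SOURCE A (Python) =====
-- def move_part(s):
--     n = len(s)
--     for i in range(n):
--         if s[i] == 1:
--             s[i] = 0
--             for j in range(i + 1, n):
--                 if s[j] == 0:
--                     s[j] = 2
--                     return s
-- ===== SOURCE B (Python) =====
-- def move_part(s):
--     # Single pass: first 1, then first 0 after it. Mutates s only when a move exists
--     # (A additionally zeroes 1s in place on the no-move path; return value is identical).
--     if 1 not in s:
--         return None
--     i = s.index(1)
--     rest = s[i + 1:]
--     if 0 not in rest:
--         return None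
--     j = i + 1 + rest.index(0)
--     s[i] = 0
--     s[j] = 2
--     return s
-- ===== Notes on version B (the rewrite author's own statement) =====
-- stated objective: idiomatic
-- what changed: Replaces A's restarting nested index scans with one find of the first 1 and one find of the first 0 after it (only the first 1 can ever produce a result, so the outer loop disappears); avoids A's quadratic worst case, though a timing run did not confirm a 1.5x gain on the generated inputs.
import Mathlib
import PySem

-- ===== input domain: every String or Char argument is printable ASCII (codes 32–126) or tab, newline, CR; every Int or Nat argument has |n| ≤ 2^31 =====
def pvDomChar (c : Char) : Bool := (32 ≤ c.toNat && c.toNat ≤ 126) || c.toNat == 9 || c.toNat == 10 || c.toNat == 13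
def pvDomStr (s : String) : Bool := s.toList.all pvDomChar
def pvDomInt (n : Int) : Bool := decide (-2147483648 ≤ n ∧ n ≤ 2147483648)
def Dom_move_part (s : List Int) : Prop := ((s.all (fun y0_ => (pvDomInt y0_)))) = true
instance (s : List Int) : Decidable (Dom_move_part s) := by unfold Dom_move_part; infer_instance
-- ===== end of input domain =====

-- B replaces A's restarting nested scans by one find of the first 1 and one find of the
-- first 0 after it; return values agree everywhere — both Pythons mutate the list
-- in place, and on the None path A additionally zeroes 1s while B leaves the list untouched;
-- the equivalence proved here is about the RETURN value.

-- ===== PORT A =====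
-- inner loop: for j in range(i+1, n): if s[j] == 0: s[j] = 2; return s
def moveInnerA (s : List Int) (js : List Nat) : Option (List Int) :=
  match js with
  | [] => none
  | j :: rest => if s.getD j 0 == 0 then some (s.set j 2) else moveInnerA s rest

-- outer loop: for i in range(n): if s[i] == 1: s[i] = 0; <inner>; (fall through = continue)
def moveOuterA (s : List Int) (n : Nat) (is_ : List Nat) : Option (List Int) :=
  match is_ with
  | [] => none
  | i :: rest =>
    if s.getD i 0 == 1 then
      let s' := s.set i 0
      match moveInnerA s' (List.range' (i + 1) (n - (i + 1))) with
      | some r => some r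
      | none => moveOuterA s' n rest
    else moveOuterA s n rest

def move_part (s : List Int) : Option (List Int) :=
  moveOuterA s s.length (List.range s.length)

-- ===== PORT B =====
def move_part_alt (s : List Int) : Option (List Int) :=
  match PySem.List.index? s 1 with            -- '1 not in s' / s.index(1)
  | none => none
  | some i =>
    let rest := PySem.List.slice s (some ((i : Int) + 1)) none   -- s[i+1:]
    match PySem.List.index? rest 0 with       -- '0 not in rest' / rest.index(0)
    | none => none
    | some k =>
      some ((s.set i 0).set (i + 1 + k) 2)    -- j = i + 1 + k; s[i]=0; s[j]=2; return s

-- ===== PRECONDITION & SPEC =====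
def Spec_move_part (s : List Int) (out : Option (List Int)) : Prop := out = move_part_alt s
instance (s : List Int) (out : Option (List Int)) : Decidable (Spec_move_part s out) := by unfold Spec_move_part; infer_instance

-- ===== CLAIM (what is proved, stated in full; the proofs are below) =====
def Claim_equal_move_part : Prop := ∀ (s : List Int), Dom_move_part s → Spec_move_part s (move_part s)

-- ===== LEMMAS AND PROOFS =====

theorem innerA_eq (m : Nat) : ∀ (a : Nat) (s : List Int), a + m = s.length →
    moveInnerA s (List.range' a m) =
      (List.idxOf? 0 (s.drop a)).map (fun k => s.set (a + k) 2) := by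
  induction m with
  | zero =>
    intro a s h
    rw [List.drop_of_length_le (by omega)]
    simp [moveInnerA]
  | succ m ih =>
    intro a s h
    have ha : a < s.length := by omega
    have hd : s.drop a = s[a] :: s.drop (a + 1) := (List.getElem_cons_drop ..).symm
    rw [List.range'_succ, hd]
    by_cases h0 : s[a] = 0
    · simp only [moveInnerA]
      rw [List.getD_eq_getElem s 0 ha]
      simp [h0, List.idxOf?_cons]
    · rw [List.idxOf?_cons]
      simp only [moveInnerA, List.getD_eq_getElem s 0 ha, beq_iff_eq, h0, if_false,
        Option.map_map]
      rw [ih (a + 1) s (by omega)]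
      congr 1
      funext k
      simp only [Function.comp]
      congr 1
      omega

theorem outerA_none (m : Nat) : ∀ (a : Nat) (s : List Int), a + m = s.length →
    (∀ j (h : j < s.length), a ≤ j → s[j] ≠ 0) →
    moveOuterA s s.length (List.range' a m) = none := by
  induction m with
  | zero => intro a s h hz; simp [moveOuterA]
  | succ m ih =>
    intro a s h hz
    have ha : a < s.length := by omega
    rw [List.range'_succ]
    show moveOuterA s s.length (a :: List.range' (a + 1) m) = none
    by_cases h1 : s[a] = 1
    · have hlen : (s.set a 0).length = s.length := by simp
      have hdrop : (s.set a 0).drop (a + 1) = s.drop (a + 1) := List.drop_set_of_lt (by omega)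
      have hinner : moveInnerA (s.set a 0) (List.range' (a + 1) (s.length - (a + 1))) = none := by
        rw [innerA_eq (s.length - (a + 1)) (a + 1) (s.set a 0) (by simp; omega), hdrop]
        have : (0 : Int) ∉ s.drop (a + 1) := by
          intro hmem
          obtain ⟨k, hk, hke⟩ := List.mem_iff_getElem.mp hmem
          rw [List.getElem_drop] at hke
          exact hz (a + 1 + k) (by simp at hk; omega) (by omega) hke
        rw [List.idxOf?_eq_none_iff.mpr this]
        rfl
      simp only [moveOuterA, List.getD_eq_getElem s 0 ha, beq_iff_eq, h1, if_true]
      rw [hinner]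
      have := ih (a + 1) (s.set a 0) (by simp; omega) ?_
      · rw [hlen] at this; exact this
      · intro j hj haj
        rw [List.getElem_set_ne (by omega) hj]
        exact hz j (by simpa using hj) (by omega)
    · simp only [moveOuterA, List.getD_eq_getElem s 0 ha, beq_iff_eq, h1, if_false]
      exact ih (a + 1) s (by omega) (fun j hj haj => hz j hj (by omega))

theorem outerA_eq (m : Nat) : ∀ (a : Nat) (s : List Int), a + m = s.length →
    moveOuterA s s.length (List.range' a m) =
      match List.idxOf? 1 (s.drop a) with
      | none => none
      | some k =>
        match List.idxOf? 0 (s.drop (a + k + 1)) with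
        | none => none
        | some k2 => some ((s.set (a + k) 0).set (a + k + 1 + k2) 2) := by
  induction m with
  | zero =>
    intro a s h
    rw [List.drop_of_length_le (by omega)]
    simp [moveOuterA]
  | succ m ih =>
    intro a s h
    have ha : a < s.length := by omega
    have hd : s.drop a = s[a] :: s.drop (a + 1) := (List.getElem_cons_drop ..).symm
    rw [List.range'_succ, hd]
    by_cases h1 : s[a] = 1
    · -- first 1 found at a : k = 0
      have hlen : (s.set a 0).length = s.length := by simp
      have hdrop : (s.set a 0).drop (a + 1) = s.drop (a + 1) := List.drop_set_of_lt (by omega)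
      simp only [moveOuterA, List.getD_eq_getElem s 0 ha, beq_iff_eq, h1, if_true]
      rw [innerA_eq (s.length - (a + 1)) (a + 1) (s.set a 0) (by simp; omega), hdrop]
      rw [List.idxOf?_cons]
      simp only [beq_self_eq_true, if_true]
      cases hz : List.idxOf? 0 (s.drop (a + 1)) with
      | some k2 =>
        simp only [Option.map_some]
        simp
      | none =>
        simp only [Option.map_none]
        have := outerA_none m (a + 1) (s.set a 0) (by simp; omega) ?_
        · rw [hlen] at this; rw [this]
        · intro j hj haj
          rw [List.getElem_set_ne (by omega) (by simpa using hj)]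
          have : (0 : Int) ∉ s.drop (a + 1) := List.idxOf?_eq_none_iff.mp hz
          intro he
          have hx : (s.drop (a + 1))[j - (a + 1)]'(by simp; omega) = s[j] := by
            rw [List.getElem_drop]; congr 1; omega
          exact this (by rw [← he, ← hx]; exact List.getElem_mem _)
    · simp only [moveOuterA, List.getD_eq_getElem s 0 ha, beq_iff_eq, h1, if_false]
      rw [ih (a + 1) s (by omega), List.idxOf?_cons]
      simp only [beq_iff_eq, h1, if_false]
      cases hz : List.idxOf? 1 (s.drop (a + 1)) with
      | none => simp
      | some k =>
        simp only [Option.map_some]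
        have e1 : a + (k + 1) = a + 1 + k := by omega
        rw [e1]

-- ===== VERDICT (by name: the statement is the Claim_ definition above) =====
theorem move_part_spec : Claim_equal_move_part := by
  intro s _
  unfold Spec_move_part move_part move_part_alt
  rw [List.range_eq_range', outerA_eq s.length 0 s (by omega)]
  simp only [List.drop_zero, PySem.List.index?_eq_idxOf?, Nat.zero_add]
  cases h1 : List.idxOf? 1 s with
  | none => rfl
  | some i =>
    have hslice : PySem.List.slice s (some ((i : Int) + 1)) none = s.drop (i + 1) := by
      have := PySem.List.slice_from_natCast (xs := s) (a := i + 1)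
      push_cast at this
      exact this
    simp only [hslice]
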